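-- pv_equiv track=rewrite | github.com/memory-eight-way/memory | quiz/make-quiz.py | proc_txt_lv74_mask_word_1_9_17
-- ===== SOURCE A (Python) =====
-- MASK_CHAR="_"
--
-- def is_memory_line(line_info):
--     """
--     記憶対象の行かを確認する
--     行番号. 文章 の構成になっているか
--     """
--     if len(line_info)!=2:
--         # 行番号＋文章の構成でない
--         return False
--
--     if line_info[1].strip()=="":
--         # 行番号＋文章の構成だけど 文章が空
--         return False
--     return True
--
-- def proc_txt_lv74_mask_word_1_9_17(lines,lv):
--     """
--     lv74 1,9,17 8n+1 の単語だけを消して、他は残す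
--     """
--     w_ret=list()
--
--     wcount=0
--     for line in lines:
--         line_info=line_to_number_body_pair(line)
--         if is_memory_line(line_info):
--             w_new_line=line_info[0]+" "+proc_line_del_1_9_17(line_info[1])
--             w_ret.append(w_new_line)
--         else:
--             w_ret.append(line)
--     return w_ret
--
-- def proc_line_del_1_9_17(line):
--     w_words=line.split(" ")
--     w_new_words=list()
--     wcount=1
--     for w_word in w_words:
--         if(wcount%8!=1):
--             w_new_words.append(w_word)
--         else:
--             w_new_words.append(MASK_CHAR*len(w_word))
--         wcount=wcount+1
--     return " ".join(w_new_words)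
--
-- def line_to_number_body_pair(wline):
--     w_word=wline.strip().split(".")
--     w_line_number=w_word[0]+"."
--     w_line_body=".".join(w_word[1:]).strip()
--     return (w_line_number ,w_line_body)
-- ===== SOURCE B (Python) =====
-- MASK_CHAR = "_"
--
--
-- def _mask_line(line):
--     """Mask every 8n+1-th word of a 'number. body' line; other lines pass through."""
--     parts = line.strip().split(".", 1)
--     if len(parts) == 2:
--         body = parts[1].strip()
--         if body != "":
--             words = body.split(" ")
--             for i in range(0, len(words), 8):
--                 words[i] = MASK_CHAR * len(words[i])
--             return parts[0] + ". " + " ".join(words)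
--     return line
--
--
-- def proc_txt_lv74_mask_word_1_9_17(lines, lv):
--     return [_mask_line(line) for line in lines]
-- ===== Notes on version B (the rewrite author's own statement) =====
-- stated objective: simpler
-- what changed: B inlines the three helpers into one per-line pass that splits on the first '.' with split('.',1) instead of full split plus '.'.join, and masks by mutating only every 8th word in place via range(0,len(words),8) instead of scanning every word with a counter tested mod 8.
import Mathlib
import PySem

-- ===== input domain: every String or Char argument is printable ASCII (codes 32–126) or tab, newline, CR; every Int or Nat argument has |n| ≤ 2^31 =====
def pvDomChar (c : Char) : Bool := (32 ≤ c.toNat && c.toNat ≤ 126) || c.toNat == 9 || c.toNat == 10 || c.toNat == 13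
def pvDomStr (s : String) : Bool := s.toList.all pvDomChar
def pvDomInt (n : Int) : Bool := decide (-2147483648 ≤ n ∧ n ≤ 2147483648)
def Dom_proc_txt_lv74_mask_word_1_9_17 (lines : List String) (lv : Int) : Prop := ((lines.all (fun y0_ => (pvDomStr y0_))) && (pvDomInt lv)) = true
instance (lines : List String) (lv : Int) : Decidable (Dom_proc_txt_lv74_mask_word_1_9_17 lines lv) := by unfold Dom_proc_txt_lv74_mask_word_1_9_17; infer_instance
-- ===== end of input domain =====

-- B inlines A's three helpers into one per-line pass using split('.',1) and masks only every 8th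
-- word via a step-8 index loop; objective: simpler. Equivalence of the return value is proved below.

-- MASK_CHAR * len(w): single-character string repetition (exact)
def pvMaskWord (w : String) : String :=
  String.ofList (PySem.List.pyRepeat "_".toList (PySem.Str.len w))

-- ===== PORT A =====
def pv_line_to_number_body_pair (wline : String) : String × String :=
  -- split? with the nonempty separator "." is always `some` of a nonempty list,
  -- so `.getD []` / `.headD ""` are exact for w_word and w_word[0]
  let w_word := (PySem.Str.split? (PySem.Str.strip wline) ".").getD []
  let w_line_number := w_word.headD "" ++ "."
  let w_line_body := PySem.Str.strip (PySem.Str.join "." (w_word.drop 1))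
  (w_line_number, w_line_body)

def pv_is_memory_line (line_info : String × String) : Bool :=
  -- `len(line_info) != 2` is always false for a pair, so only the empty-body test remains
  if PySem.Str.strip line_info.2 == "" then false else true

def pv_proc_line_del_1_9_17 (line : String) : String :=
  let w_words := (PySem.Str.split? line " ").getD []
  let res := w_words.foldl
    (fun (st : List String × Int) w_word =>
      if st.2 % 8 ≠ 1 then (st.1 ++ [w_word], st.2 + 1)
      else (st.1 ++ [pvMaskWord w_word], st.2 + 1))
    ([], 1)
  PySem.Str.join " " res.1

def proc_txt_lv74_mask_word_1_9_17 (lines : List String) (lv : Int) : List String :=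
  lines.foldl (fun w_ret line =>
    let line_info := pv_line_to_number_body_pair line
    if pv_is_memory_line line_info then
      w_ret ++ [line_info.1 ++ " " ++ pv_proc_line_del_1_9_17 line_info.2]
    else
      w_ret ++ [line]) []

-- ===== PORT B =====
def pvAltMaskLine (line : String) : String :=
  match PySem.Str.splitMax? (PySem.Str.strip line) "." 1 with
  | some [num, rest] =>
    let body := PySem.Str.strip rest
    if body == "" then line
    else
      let words := (PySem.Str.split? body " ").getD []
      -- for i in range(0, len(words), 8): words[i] = "_" * len(words[i])
      let masked := (PySem.List.pyRange 0 (words.length : Int) 8).foldl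
        (fun ws i => ws.set i.toNat (pvMaskWord (ws.getD i.toNat ""))) words
      num ++ ". " ++ PySem.Str.join " " masked
  | _ => line

def proc_txt_lv74_mask_word_1_9_17_alt (lines : List String) (lv : Int) : List String :=
  lines.map pvAltMaskLine

-- ===== PRECONDITION & SPEC =====
def Spec_proc_txt_lv74_mask_word_1_9_17 (lines : List String) (lv : Int) (out : List String) : Prop := out = proc_txt_lv74_mask_word_1_9_17_alt lines lv
instance (lines : List String) (lv : Int) (out : List String) : Decidable (Spec_proc_txt_lv74_mask_word_1_9_17 lines lv out) := by unfold Spec_proc_txt_lv74_mask_word_1_9_17; infer_instance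

-- ===== CLAIM (what is proved, stated in full; the proofs are below) =====
def Claim_equal_proc_txt_lv74_mask_word_1_9_17 : Prop := ∀ (lines : List String) (lv : Int), Dom_proc_txt_lv74_mask_word_1_9_17 lines lv → Spec_proc_txt_lv74_mask_word_1_9_17 lines lv (proc_txt_lv74_mask_word_1_9_17 lines lv)

-- ===== LEMMAS AND PROOFS =====

-- structural characterisation of Chars.splitOn with a single-character separator
def pvSplit (c : Char) (pre : List Char) : List Char → List (List Char)
  | [] => [pre]
  | x :: r => if x = c then pre :: pvSplit c [] r else pvSplit c (pre ++ [x]) r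

-- structural characterisation of Chars.splitOnMax … 1 with a single-character separator
def pvSplit1 (c : Char) (pre : List Char) : List Char → List (List Char)
  | [] => [pre]
  | x :: r => if x = c then [pre, r] else pvSplit1 c (pre ++ [x]) r

theorem pvSplit_ne_nil (c : Char) (pre l : List Char) : pvSplit c pre l ≠ [] := by
  induction l generalizing pre with
  | nil => simp [pvSplit]
  | cons x r ih => simp only [pvSplit]; split_ifs <;> simp [ih]

set_option maxRecDepth 10000 in
theorem pv_go_eq (c : Char) (fuel : Nat) (l cur : List Char) (acc : List (List Char))
    (h : l.length < fuel) :
    PySem.Chars.splitOn.go [c] fuel l cur acc = acc.reverse ++ pvSplit c cur.reverse l := by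
  induction fuel generalizing l cur acc with
  | zero => omega
  | succ f ih =>
    rw [PySem.Chars.splitOn.go.eq_def]
    cases l with
    | nil => simp [pvSplit]
    | cons x r =>
      simp only [List.isPrefixOf, List.isPrefixOf_nil_left, Bool.and_true]
      by_cases hx : x = c
      · simp only [hx, beq_self_eq_true, if_pos, List.length_cons, List.length_nil,
          List.drop_succ_cons, List.drop_zero]
        rw [ih r [] (cur.reverse :: acc) (by simp at h ⊢; omega)]
        have hr : pvSplit c cur.reverse (c :: r) = cur.reverse :: pvSplit c [] r := by
          simp only [pvSplit]; rw [if_pos trivial]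
        rw [hr]; simp
      · have : (c == x) = false := beq_eq_false_iff_ne.mpr (fun hh => hx hh.symm)
        simp only [this, Bool.false_eq_true, if_false]
        rw [ih r (x :: cur) acc (by simp at h ⊢; omega)]
        have hr : pvSplit c cur.reverse (x :: r) = pvSplit c (cur.reverse ++ [x]) r := by
          simp only [pvSplit]; rw [if_neg hx]
        rw [hr]; simp

theorem pv_splitOn_single (c : Char) (s : List Char) :
    PySem.Chars.splitOn s [c] = pvSplit c [] s := by
  unfold PySem.Chars.splitOn
  rw [pv_go_eq c (s.length + 1) s [] [] (by omega)]
  simp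

theorem pv_go0_eq (c : Char) (fuel : Nat) (l cur : List Char) (acc : List (List Char))
    (h : l.length < fuel) :
    PySem.Chars.splitOnMax.go [c] fuel 0 l cur acc = acc.reverse ++ [cur.reverse ++ l] := by
  cases fuel with
  | zero => omega
  | succ f =>
    rw [PySem.Chars.splitOnMax.go.eq_def]
    cases l <;> simp

set_option maxRecDepth 10000 in
theorem pv_gom_eq (c : Char) (fuel : Nat) (l cur : List Char) (acc : List (List Char))
    (h : l.length < fuel) :
    PySem.Chars.splitOnMax.go [c] fuel 1 l cur acc = acc.reverse ++ pvSplit1 c cur.reverse l := by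
  induction fuel generalizing l cur acc with
  | zero => omega
  | succ f ih =>
    rw [PySem.Chars.splitOnMax.go.eq_def]
    cases l with
    | nil => simp [pvSplit1]
    | cons x r =>
      simp only [List.isPrefixOf, List.isPrefixOf_nil_left, Bool.and_true]
      by_cases hx : x = c
      · simp only [hx, beq_self_eq_true, if_pos, if_neg (by omega : ¬ (1 : Nat) = 0),
          List.length_cons, List.length_nil, List.drop_succ_cons, List.drop_zero]
        have h10 : (1 : Nat) - 1 = 0 := rfl
        rw [h10, pv_go0_eq c f r [] (cur.reverse :: acc) (by simp at h ⊢; omega)]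
        have hr : pvSplit1 c cur.reverse (c :: r) = [cur.reverse, r] := by
          simp only [pvSplit1]; rw [if_pos trivial]
        rw [hr]; simp
      · have : (c == x) = false := beq_eq_false_iff_ne.mpr (fun hh => hx hh.symm)
        simp only [this, Bool.false_eq_true, if_false, if_neg (by omega : ¬ (1 : Nat) = 0)]
        rw [ih r (x :: cur) acc (by simp at h ⊢; omega)]
        have hr : pvSplit1 c cur.reverse (x :: r) = pvSplit1 c (cur.reverse ++ [x]) r := by
          simp only [pvSplit1]; rw [if_neg hx]
        rw [hr]; simp

theorem pv_splitOnMax_single (c : Char) (s : List Char) :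
    PySem.Chars.splitOnMax s [c] 1 = pvSplit1 c [] s := by
  unfold PySem.Chars.splitOnMax
  rw [if_neg (by omega : ¬ (1 : Int) < 0)]
  rw [show Int.toNat 1 = 1 from rfl]
  rw [pv_gom_eq c (s.length + 1) s [] [] (by omega)]
  simp

theorem pv_join_pvSplit (c : Char) (l pre : List Char) :
    PySem.Chars.join [c] (pvSplit c pre l) = pre ++ l := by
  induction l generalizing pre with
  | nil => simp [pvSplit, PySem.Chars.join, List.intercalate]
  | cons x r ih =>
    simp only [pvSplit]
    by_cases hx : x = c
    · simp only [hx, if_pos rfl]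
      have hne := pvSplit_ne_nil c ([] : List Char) r
      obtain ⟨p, tl, hpt⟩ := List.exists_cons_of_ne_nil hne
      have := ih ([] : List Char)
      simp only [PySem.Chars.join] at this ⊢
      rw [hpt] at this ⊢
      simp only [List.intercalate, List.intersperse] at this ⊢
      simp_all
    · rw [if_neg hx, ih (pre ++ [x])]
      simp

theorem pv_pvSplit1_eq (c : Char) (l pre : List Char) :
    pvSplit1 c pre l =
      if (pvSplit c pre l).length = 1 then pvSplit c pre l
      else [(pvSplit c pre l).headD [], PySem.Chars.join [c] ((pvSplit c pre l).drop 1)] := by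
  induction l generalizing pre with
  | nil => simp [pvSplit1, pvSplit]
  | cons x r ih =>
    simp only [pvSplit1, pvSplit]
    by_cases hx : x = c
    · simp only [if_pos hx]
      have hne := pvSplit_ne_nil c ([] : List Char) r
      obtain ⟨p, tl, hpt⟩ := List.exists_cons_of_ne_nil hne
      rw [hpt]
      have hj : PySem.Chars.join [c] (p :: tl) = r := by rw [← hpt, pv_join_pvSplit]; simp
      simp [hj]
    · simp only [if_neg hx]; exact ih (pre ++ [x])

-- A's counter loop, written structurally
def pvMaskRec : List String → Int → List String
  | [], _ => []
  | w :: ws, n => (if n % 8 ≠ 1 then w else pvMaskWord w) :: pvMaskRec ws (n + 1)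

theorem pv_afold_eq (ws : List String) (acc : List String) (n : Int) :
    (ws.foldl
      (fun (st : List String × Int) w =>
        if st.2 % 8 ≠ 1 then (st.1 ++ [w], st.2 + 1) else (st.1 ++ [pvMaskWord w], st.2 + 1))
      (acc, n)).1 = acc ++ pvMaskRec ws n := by
  induction ws generalizing acc n with
  | nil => simp [pvMaskRec]
  | cons w ws ih =>
    simp only [List.foldl_cons, pvMaskRec]
    by_cases h : n % 8 ≠ 1
    · rw [if_pos h]; rw [ih]; simp [h]
    · rw [if_neg h]; rw [ih]; simp [h]

theorem pv_maskRec_get (ws : List String) (n : Int) (j : Nat) :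
    (pvMaskRec ws n)[j]? =
      if (n + j) % 8 = 1 then (ws[j]?).map pvMaskWord else ws[j]? := by
  induction ws generalizing n j with
  | nil => simp [pvMaskRec]
  | cons w ws ih =>
    cases j with
    | zero =>
      simp only [pvMaskRec, List.getElem?_cons_zero, Nat.cast_zero, add_zero]
      by_cases h : n % 8 = 1 <;> simp [h]
    | succ k =>
      simp only [pvMaskRec, List.getElem?_cons_succ]
      rw [ih (n + 1) k]
      have : n + 1 + (k : Int) = n + ((k : Nat) + 1 : Nat) := by push_cast; ring
      rw [this]

-- a fold of `set`s at strictly increasing nonnegative positions, read back pointwise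
theorem pv_setfold_get (idxs : List Int) (ws : List String)
    (hpos : ∀ i ∈ idxs, 0 ≤ i) (hsorted : idxs.Pairwise (· < ·)) (j : Nat) :
    (idxs.foldl (fun l i => l.set i.toNat (pvMaskWord (l.getD i.toNat ""))) ws)[j]? =
      if (j : Int) ∈ idxs then (ws[j]?).map pvMaskWord else ws[j]? := by
  induction idxs generalizing ws with
  | nil => simp
  | cons i0 rest ih =>
    simp only [List.foldl_cons]
    have hpos0 : 0 ≤ i0 := hpos i0 (by simp)
    have hrest : ∀ i ∈ rest, 0 ≤ i := fun i hi => hpos i (by simp [hi])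
    have hgt : ∀ i ∈ rest, i0 < i := fun i hi => (List.pairwise_cons.mp hsorted).1 i hi
    rw [ih (ws.set i0.toNat (pvMaskWord (ws.getD i0.toNat ""))) hrest
      (List.pairwise_cons.mp hsorted).2 ]
    by_cases hmem : (j : Int) ∈ rest
    · have hne : i0.toNat ≠ j := by
        have := hgt _ hmem; omega
      rw [if_pos hmem, List.getElem?_set_ne hne, if_pos (by simp [hmem])]
    · rw [if_neg hmem]
      by_cases hj0 : (j : Int) = i0
      · have hj : i0.toNat = j := by omega
        rw [if_pos (by simp [hj0])]
        rw [hj]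
        by_cases hlt : j < ws.length
        · rw [List.getElem?_set_self hlt, List.getElem?_eq_getElem hlt]
          simp [List.getD_eq_getElem?_getD, List.getElem?_eq_getElem hlt]
        · have h1 : ws[j]? = none := List.getElem?_eq_none (by omega)
          rw [List.set_eq_of_length_le (by omega)]
          simp [h1]
      · have hne : i0.toNat ≠ j := by omega
        rw [List.getElem?_set_ne hne, if_neg (by simp [hj0, hmem])]

theorem pv_strip_nil_iff (y : List Char) :
    PySem.Chars.strip y = [] ↔ ∀ x ∈ y, PySem.Chars.isspace x = true := by
  unfold PySem.Chars.strip PySem.Chars.rstrip PySem.Chars.lstrip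
  rw [List.reverse_eq_nil_iff, List.dropWhile_eq_nil_iff]
  simp only [List.mem_reverse]
  constructor
  · intro h x hx
    have hnil : List.dropWhile PySem.Chars.isspace y = [] := by
      by_contra hne
      have hh := List.head_dropWhile_not PySem.Chars.isspace (l := y) hne
      exact absurd (h _ (List.head_mem hne)) (by simp [hh])
    exact (List.dropWhile_eq_nil_iff.mp hnil) x hx
  · intro h x hx
    exact h x ((List.dropWhile_sublist _).subset hx)

theorem pv_strip_strip_nil (r : List Char) :
    PySem.Chars.strip (PySem.Chars.strip r) = [] ↔ PySem.Chars.strip r = [] := by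
  constructor
  · intro h
    rw [pv_strip_nil_iff] at h
    by_contra hne
    -- head of lstrip r is not whitespace and survives into strip r
    have hune : PySem.Chars.lstrip r ≠ [] := by
      intro h0
      apply hne
      show PySem.Chars.rstrip (PySem.Chars.lstrip r) = []
      rw [h0]
      rfl
    have hhead : PySem.Chars.isspace ((PySem.Chars.lstrip r).head hune) = false :=
      List.head_dropWhile_not _ hune
    have hpref : PySem.Chars.strip r <+: PySem.Chars.lstrip r := by
      show PySem.Chars.rstrip (PySem.Chars.lstrip r) <+: PySem.Chars.lstrip r
      unfold PySem.Chars.rstrip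
      have hsuf : List.dropWhile PySem.Chars.isspace (PySem.Chars.lstrip r).reverse <:+
          (PySem.Chars.lstrip r).reverse := List.dropWhile_suffix _
      have := hsuf.reverse
      simpa using this
    have hmem : (PySem.Chars.lstrip r).head hune ∈ PySem.Chars.strip r := by
      obtain ⟨t, ht⟩ := hpref
      cases hsr : PySem.Chars.strip r with
      | nil => exact absurd hsr hne
      | cons a l =>
        rw [hsr] at ht
        have : (PySem.Chars.lstrip r).head hune = a := by
          have h2 : PySem.Chars.lstrip r = a :: (l ++ t) := by rw [← ht]; simp
          simp [h2]
        rw [this]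
        exact List.mem_cons_self
    have := h _ hmem
    rw [this] at hhead
    cases hhead
  · intro h
    rw [h]
    rfl

theorem pv_pyRange8_nonneg (n : Int) : ∀ i ∈ PySem.List.pyRange 0 n 8, 0 ≤ i := by
  intro i hi
  have := (PySem.List.mem_pyRange_iff_of_pos (by omega : (0:Int) < 8) i).mp hi
  omega

theorem pv_pyRange8_pairwise (n : Int) :
    (PySem.List.pyRange 0 n 8).Pairwise (· < ·) := by
  rw [PySem.List.pyRange_of_pos 0 n (by omega : (0:Int) < 8)]
  rw [List.pairwise_map]
  exact List.pairwise_lt_range.imp (by intro a b hab; omega)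

theorem pv_mask_eq (ws : List String) :
    (PySem.List.pyRange 0 (ws.length : Int) 8).foldl
      (fun l i => l.set i.toNat (pvMaskWord (l.getD i.toNat ""))) ws = pvMaskRec ws 1 := by
  apply List.ext_getElem?
  intro j
  rw [pv_setfold_get _ _ (pv_pyRange8_nonneg _) (pv_pyRange8_pairwise _) j, pv_maskRec_get]
  by_cases hj : j < ws.length
  · by_cases hd : (8 : Int) ∣ (j : Int)
    · rw [if_pos, if_pos]
      · omega
      · rw [PySem.List.mem_pyRange_iff_of_pos (by omega : (0:Int) < 8)]
        refine ⟨by omega, by exact_mod_cast hj, by simpa using hd⟩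
    · rw [if_neg, if_neg]
      · omega
      · rw [PySem.List.mem_pyRange_iff_of_pos (by omega : (0:Int) < 8)]
        push_neg
        intro _ _
        simpa using hd
  · have hnone : ws[j]? = none := List.getElem?_eq_none (by omega)
    split_ifs <;> simp [hnone]

theorem pv_map_toList_ofList (l : List (List Char)) :
    (l.map String.ofList).map String.toList = l := by
  induction l with
  | nil => rfl
  | cons a t ih => simp [ih]

theorem pv_line_eq (line : String) :
    pvAltMaskLine line =
      (if pv_is_memory_line (pv_line_to_number_body_pair line) then
        (pv_line_to_number_body_pair line).1 ++ " " ++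
          pv_proc_line_del_1_9_17 (pv_line_to_number_body_pair line).2
      else line) := by
  have hdot : (".":String).toList = ['.'] := rfl
  have hsplit : PySem.Str.split? (PySem.Str.strip line) "." =
      some ((pvSplit '.' [] (PySem.Str.strip line).toList).map String.ofList) := by
    rw [PySem.Str.split?, PySem.Chars.split?, hdot]
    simp [pv_splitOn_single]
  have hmax : PySem.Str.splitMax? (PySem.Str.strip line) "." 1 =
      some ((pvSplit1 '.' [] (PySem.Str.strip line).toList).map String.ofList) := by
    rw [PySem.Str.splitMax?, hdot]
    simp [PySem.Chars.splitMax?, pv_splitOnMax_single]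
  by_cases hlen : (pvSplit '.' [] (PySem.Str.strip line).toList).length = 1
  · obtain ⟨p, hp⟩ := List.length_eq_one_iff.mp hlen
    have h1 : pvSplit1 '.' [] (PySem.Str.strip line).toList = [p] := by
      rw [pv_pvSplit1_eq, if_pos hlen, hp]
    have hA : pv_is_memory_line (pv_line_to_number_body_pair line) = false := by
      simp only [pv_is_memory_line, pv_line_to_number_body_pair, hsplit, hp, Option.getD_some,
        List.map_cons, List.map_nil, List.drop_one, List.tail_cons]
      decide
    rw [if_neg (by rw [hA]; exact Bool.false_ne_true)]
    unfold pvAltMaskLine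
    rw [hmax, h1]
    rfl
  · have hne := pvSplit_ne_nil '.' [] (PySem.Str.strip line).toList
    obtain ⟨p, tl, hp⟩ := List.exists_cons_of_ne_nil hne
    have htl : tl ≠ [] := by
      intro h0
      apply hlen
      rw [hp, h0]
      rfl
    have h1 : pvSplit1 '.' [] (PySem.Str.strip line).toList =
        [p, PySem.Chars.join ['.'] tl] := by
      rw [pv_pvSplit1_eq, if_neg hlen, hp]
      simp
    have hjoin : PySem.Str.join "." (tl.map String.ofList) =
        String.ofList (PySem.Chars.join ['.'] tl) := by
      rw [PySem.Str.join, hdot]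
      rw [pv_map_toList_ofList]
    have hinfo : pv_line_to_number_body_pair line =
        (String.ofList p ++ ".",
         PySem.Str.strip (String.ofList (PySem.Chars.join ['.'] tl))) := by
      simp only [pv_line_to_number_body_pair, hsplit, hp, Option.getD_some, List.map_cons,
        List.headD_cons, List.drop_one, List.tail_cons]
      rw [hjoin]
    have hsiff : PySem.Str.strip (PySem.Str.strip (String.ofList (PySem.Chars.join ['.'] tl))) = "" ↔
        PySem.Str.strip (String.ofList (PySem.Chars.join ['.'] tl)) = "" := by
      constructor
      · intro h
        have h2 : PySem.Chars.strip (PySem.Chars.strip (PySem.Chars.join ['.'] tl)) = [] := by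
          have h3 := congrArg String.toList h
          rw [PySem.Str.toList_strip, PySem.Str.toList_strip, String.toList_ofList] at h3
          simpa using h3
        rw [pv_strip_strip_nil] at h2
        show String.ofList (PySem.Chars.strip (String.ofList (PySem.Chars.join ['.'] tl)).toList) = ""
        rw [String.toList_ofList, h2]
      · intro h
        rw [h]
        rfl
    unfold pvAltMaskLine
    rw [hmax, h1]
    by_cases hb : PySem.Str.strip (String.ofList (PySem.Chars.join ['.'] tl)) = ""
    · have hmem : pv_is_memory_line (pv_line_to_number_body_pair line) = false := by
        rw [hinfo]
        simp only [pv_is_memory_line, hb]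
        decide
      rw [if_neg (by rw [hmem]; exact Bool.false_ne_true)]
      simp [hb]
    · have hbb : (PySem.Str.strip (String.ofList (PySem.Chars.join ['.'] tl)) == "") = false :=
        beq_eq_false_iff_ne.mpr hb
      have hmem : pv_is_memory_line (pv_line_to_number_body_pair line) = true := by
        rw [hinfo]
        simp only [pv_is_memory_line]
        have hc2 : (PySem.Str.strip (PySem.Str.strip (String.ofList (PySem.Chars.join ['.'] tl)))
            == "") = false := beq_eq_false_iff_ne.mpr (fun h => hb (hsiff.mp h))
        rw [hc2]
        rfl
      rw [if_pos hmem, hinfo]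
      simp only [List.map_cons, List.map_nil, hbb, Bool.false_eq_true, if_false]
      simp only [pv_proc_line_del_1_9_17]
      rw [pv_afold_eq _ [] 1, pv_mask_eq]
      simp only [List.nil_append]
      rw [String.append_assoc, String.append_assoc, String.append_assoc]
      have hds : ("." : String) ++ " " = ". " := rfl
      rw [← hds, String.append_assoc]

theorem pv_A_foldl (lines : List String) (acc : List String) :
    lines.foldl (fun w_ret line =>
      let line_info := pv_line_to_number_body_pair line
      if pv_is_memory_line line_info then
        w_ret ++ [line_info.1 ++ " " ++ pv_proc_line_del_1_9_17 line_info.2]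
      else
        w_ret ++ [line]) acc = acc ++ lines.map pvAltMaskLine := by
  induction lines generalizing acc with
  | nil => simp
  | cons l ls ih =>
    simp only [List.foldl_cons, List.map_cons]
    rw [pv_line_eq l]
    by_cases hc : pv_is_memory_line (pv_line_to_number_body_pair l) = true
    · simp only [hc, if_pos]
      rw [ih]
      simp
    · simp only [hc, Bool.false_eq_true, if_neg, if_false]
      rw [ih]
      simp [hc]

-- ===== VERDICT (by name: the statement is the Claim_ definition above) =====
theorem proc_txt_lv74_mask_word_1_9_17_spec : Claim_equal_proc_txt_lv74_mask_word_1_9_17 := by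
  intro lines lv _
  unfold Spec_proc_txt_lv74_mask_word_1_9_17
  show proc_txt_lv74_mask_word_1_9_17 lines lv = proc_txt_lv74_mask_word_1_9_17_alt lines lv
  simp only [proc_txt_lv74_mask_word_1_9_17, proc_txt_lv74_mask_word_1_9_17_alt]
  rw [pv_A_foldl]
  simp
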